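-- pv_equiv track=rewrite | github.com/player20/AI-agents | workflow_yaml_parser.py | find_disconnected_agents
-- ===== SOURCE A (Python) =====
-- from typing import Dict, List, Any, Tuple
--
-- def extract_agent_id_from_node(node_id: str) -> str:
--     """
--     Extract agent type ID from node ID
--     Node IDs have format: "AgentType-timestamp" (e.g., "PM-1234567890")
--
--     Args:
--         node_id: Full node ID from workflow
--
--     Returns:
--         Agent type ID (e.g., "PM")
--     """
--     if not node_id:
--         return ""
--
--     # Split on dash and take first part
--     parts = node_id.split('-')
--     if len(parts) >= 1:
--         return parts[0]
--
--     return node_id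
--
-- def find_disconnected_agents(agent_ids: List[str], connections: List[Dict]) -> List[str]:
--     """
--     Find agents with no incoming or outgoing connections
--
--     Args:
--         agent_ids: List of agent IDs
--         connections: List of connections
--
--     Returns:
--         List of disconnected agent IDs
--     """
--     connected = set()
--
--     for conn in connections:
--         source = extract_agent_id_from_node(conn.get('source', ''))
--         target = extract_agent_id_from_node(conn.get('target', ''))
--         connected.add(source)
--         connected.add(target)
--
--     disconnected = [agent_id for agent_id in agent_ids if agent_id not in connected]
--     return disconnected
-- ===== SOURCE B (Python) =====
-- from typing import Dict, List, Any, Tuple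
--
-- def extract_agent_id_from_node(node_id: str) -> str:
--     if not node_id:
--         return ""
--     parts = node_id.split('-')
--     if len(parts) >= 1:
--         return parts[0]
--     return node_id
--
-- def find_disconnected_agents(agent_ids: List[str], connections: List[Dict]) -> List[str]:
--     # Per-agent scan: no pre-built membership set; each agent re-scans the connections.
--     disconnected = []
--     for agent_id in agent_ids:
--         if not any(extract_agent_id_from_node(conn.get('source', '')) == agent_id
--                    or extract_agent_id_from_node(conn.get('target', '')) == agent_id
--                    for conn in connections):
--             disconnected.append(agent_id)
--     return disconnected
-- ===== Notes on version B (the rewrite author's own statement) =====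
-- stated objective: alternative
-- what changed: B drops A's pre-built connected set and instead, for each agent in order, scans all connections with any(...) to test whether that agent appears as an extracted source or target, appending it when no connection matches.
import Mathlib
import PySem

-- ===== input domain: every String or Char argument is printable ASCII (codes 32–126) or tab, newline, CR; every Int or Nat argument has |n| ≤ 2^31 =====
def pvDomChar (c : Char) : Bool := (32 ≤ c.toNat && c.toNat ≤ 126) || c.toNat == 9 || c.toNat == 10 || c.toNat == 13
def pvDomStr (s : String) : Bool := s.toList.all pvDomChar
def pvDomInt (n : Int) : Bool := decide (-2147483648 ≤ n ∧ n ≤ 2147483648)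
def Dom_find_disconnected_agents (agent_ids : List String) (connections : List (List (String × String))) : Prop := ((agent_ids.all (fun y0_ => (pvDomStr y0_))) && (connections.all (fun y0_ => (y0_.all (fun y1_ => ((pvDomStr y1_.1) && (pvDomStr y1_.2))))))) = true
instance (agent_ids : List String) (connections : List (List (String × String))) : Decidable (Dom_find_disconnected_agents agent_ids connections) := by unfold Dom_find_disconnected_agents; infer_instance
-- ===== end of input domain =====

-- B changes the decomposition only (per-agent scan of connections via any, instead of A's
-- pre-built connected set); same results, no speed claim.

-- ===== PORT A =====
-- shared module helper: extract_agent_id_from_node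
def extract_agent_id_from_node (node_id : String) : String :=
  if node_id = "" then ""
  else
    let parts := (PySem.Str.split? node_id "-").getD []  -- sep "-" ≠ "", exact
    if 1 ≤ parts.length then PySem.List.pyGetD parts 0 node_id
    else node_id

def find_disconnected_agents (agent_ids : List String) (connections : List (List (String × String))) : List String :=
  let connected : PySem.Set String :=
    connections.foldl (fun s conn =>
      let source := extract_agent_id_from_node (PySem.Dict.getD (PySem.Dict.mk conn) "source" "")
      let target := extract_agent_id_from_node (PySem.Dict.getD (PySem.Dict.mk conn) "target" "")
      PySem.Set.add (PySem.Set.add s source) target) PySem.Set.empty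
  agent_ids.filter (fun agent_id => !(PySem.Set.contains connected agent_id))

-- ===== PORT B =====
def find_disconnected_agents_alt (agent_ids : List String) (connections : List (List (String × String))) : List String :=
  agent_ids.foldl (fun disconnected agent_id =>
    if !(connections.any (fun conn =>
        extract_agent_id_from_node (PySem.Dict.getD (PySem.Dict.mk conn) "source" "") == agent_id
        || extract_agent_id_from_node (PySem.Dict.getD (PySem.Dict.mk conn) "target" "") == agent_id))
    then disconnected ++ [agent_id]
    else disconnected) []

-- ===== PRECONDITION & SPEC =====
def Spec_find_disconnected_agents (agent_ids : List String) (connections : List (List (String × String))) (out : List String) : Prop := out = find_disconnected_agents_alt agent_ids connections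
instance (agent_ids : List String) (connections : List (List (String × String))) (out : List String) : Decidable (Spec_find_disconnected_agents agent_ids connections out) := by unfold Spec_find_disconnected_agents; infer_instance

-- ===== CLAIM (what is proved, stated in full; the proofs are below) =====
def Claim_equal_find_disconnected_agents : Prop := ∀ (agent_ids : List String) (connections : List (List (String × String))), Dom_find_disconnected_agents agent_ids connections → Spec_find_disconnected_agents agent_ids connections (find_disconnected_agents agent_ids connections)

-- ===== LEMMAS AND PROOFS =====

-- membership in A's two-adds-per-connection fold
theorem mem_connected_fold (connections : List (List (String × String))) (s : PySem.Set String) (y : String) :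
    y ∈ connections.foldl (fun s conn =>
      PySem.Set.add (PySem.Set.add s (extract_agent_id_from_node (PySem.Dict.getD (PySem.Dict.mk conn) "source" "")))
        (extract_agent_id_from_node (PySem.Dict.getD (PySem.Dict.mk conn) "target" ""))) s
    ↔ y ∈ s ∨ ∃ conn ∈ connections,
        y = extract_agent_id_from_node (PySem.Dict.getD (PySem.Dict.mk conn) "source" "")
        ∨ y = extract_agent_id_from_node (PySem.Dict.getD (PySem.Dict.mk conn) "target" "") := by
  induction connections generalizing s with
  | nil => simp
  | cons c cs ih =>
    simp only [List.foldl_cons, ih, PySem.Set.mem_add, List.mem_cons]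
    constructor
    · rintro (((h | h) | h) | ⟨conn, hc, h⟩)
      · exact Or.inl h
      · exact Or.inr ⟨c, Or.inl rfl, Or.inl h⟩
      · exact Or.inr ⟨c, Or.inl rfl, Or.inr h⟩
      · exact Or.inr ⟨conn, Or.inr hc, h⟩
    · rintro (h | ⟨conn, (rfl | hc), h⟩)
      · exact Or.inl (Or.inl (Or.inl h))
      · rcases h with h | h
        · exact Or.inl (Or.inl (Or.inr h))
        · exact Or.inl (Or.inr h)
      · exact Or.inr ⟨conn, hc, h⟩

-- ===== VERDICT (by name: the statement is the Claim_ definition above) =====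
theorem find_disconnected_agents_spec : Claim_equal_find_disconnected_agents := by
  intro agent_ids connections _
  show find_disconnected_agents agent_ids connections = find_disconnected_agents_alt agent_ids connections
  unfold find_disconnected_agents find_disconnected_agents_alt
  rw [PySem.List.foldl_append_ite_eq_filter]
  simp only [List.nil_append]
  apply List.filter_congr
  intro a _
  have h := mem_connected_fold connections PySem.Set.empty a
  simp only [PySem.Set.empty, List.not_mem_nil, false_or] at h
  simp only [Bool.decide_eq_true, PySem.Set.empty]
  rw [Bool.eq_iff_iff]
  simp [h]
  constructor <;>
    (intro hh x hx
     have := hh x hx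
     exact ⟨fun e => this.1 e.symm, fun e => this.2 e.symm⟩)
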